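-- pv_equiv track=rewrite | github.com/kulakaka/NUSCS | CS1010E/PETEST.py | find_parents
-- ===== SOURCE A (Python) =====
-- def find_parents(child_dna,dna_dataset):
--     ad = {}
--     result =[]
--     for i in range(len(dna_dataset)):
--         ad[i] = dna_dataset[i]
--     for x in ad:
--         for i in dna_dataset:
--             if ad.get(x)+i == child_dna:
--                 result.append((ad.get(x),i))
--     return result
-- ===== SOURCE B (Python) =====
-- def find_parents(child_dna, dna_dataset):
--     cnt = {}
--     for s in dna_dataset:
--         cnt[s] = cnt.get(s, 0) + 1
--     result = []
--     for a in dna_dataset: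
--         if child_dna.startswith(a):
--             suffix = child_dna[len(a):]
--             result += [(a, suffix)] * cnt.get(suffix, 0)
--     return result
-- ===== Notes on version B (the rewrite author's own statement) =====
-- stated objective: faster
-- what changed: Instead of testing every ordered pair (a,i) of dataset strings against child_dna (quadratic in the dataset size), B builds a count dictionary of the dataset once and, for each string a that is a prefix of child_dna, emits (a, suffix) as many times as the suffix occurs in the dataset.
import Mathlib
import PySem

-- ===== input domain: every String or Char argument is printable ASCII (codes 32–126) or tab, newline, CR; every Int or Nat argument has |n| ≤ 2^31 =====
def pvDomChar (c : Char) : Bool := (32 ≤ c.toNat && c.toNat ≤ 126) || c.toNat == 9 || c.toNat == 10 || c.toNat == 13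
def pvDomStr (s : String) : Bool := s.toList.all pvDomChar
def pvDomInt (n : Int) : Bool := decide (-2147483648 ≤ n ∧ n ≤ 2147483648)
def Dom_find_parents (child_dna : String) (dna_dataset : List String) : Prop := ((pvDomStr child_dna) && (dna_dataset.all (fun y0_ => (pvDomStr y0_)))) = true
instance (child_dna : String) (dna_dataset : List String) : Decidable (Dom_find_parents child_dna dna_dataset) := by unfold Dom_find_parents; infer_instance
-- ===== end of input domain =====

-- B replaces A's all-pairs scan with a one-pass count dictionary plus a prefix test per
-- dataset string (asymptotically faster); equivalence proved on all inputs.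


-- ===== PORT A =====
-- 'ad.get(x)+i == child_dna': string concatenation/equality is compared on code points
-- (.toList — exact for Python str equality; Lean's String.append is kernel-opaque).
-- dataset[i] is PySem.List.pyGetD and ad.get(x) is Dict.getD: the index is always in
-- range and the key always present here, so the defaults are never consulted.
def find_parents (child_dna : String) (dna_dataset : List String) : List (String × String) :=
  let ad : PySem.Dict Int String :=
    (PySem.List.pyRange 0 (PySem.List.len dna_dataset)).foldl
      (fun d i => d.insert i (PySem.List.pyGetD dna_dataset i "")) PySem.Dict.empty
  (PySem.Dict.keys ad).foldl (fun result x =>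
    dna_dataset.foldl (fun result i =>
      if (PySem.Dict.getD ad x "").toList ++ i.toList = child_dna.toList then
        result ++ [(PySem.Dict.getD ad x "", i)]
      else result) result) []

-- ===== PORT B =====
-- Source B: build the count dict once, then one pass over the dataset emitting
-- (a, suffix) cnt[suffix] times for each a that is a prefix of child_dna.
def find_parents_alt (child_dna : String) (dna_dataset : List String) : List (String × String) :=
  let cnt : PySem.Dict String Int :=
    dna_dataset.foldl (fun d s => d.modify s 0 (fun x => x + 1)) PySem.Dict.empty
  dna_dataset.foldl (fun result a =>
    if PySem.Str.startswith child_dna a then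
      let suffix := PySem.Str.slice child_dna (some (PySem.Str.len a)) none
      result ++ List.replicate (PySem.Dict.getD cnt suffix 0).toNat (a, suffix)
    else result) []

-- ===== PRECONDITION & SPEC =====
def Spec_find_parents (child_dna : String) (dna_dataset : List String) (out : List (String × String)) : Prop := out = find_parents_alt child_dna dna_dataset
instance (child_dna : String) (dna_dataset : List String) (out : List (String × String)) : Decidable (Spec_find_parents child_dna dna_dataset out) := by unfold Spec_find_parents; infer_instance

-- ===== CLAIM (what is proved, stated in full; the proofs are below) =====
def Claim_equal_find_parents : Prop := ∀ (child_dna : String) (dna_dataset : List String), Dom_find_parents child_dna dna_dataset → Spec_find_parents child_dna dna_dataset (find_parents child_dna dna_dataset)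

-- ===== LEMMAS AND PROOFS =====

-- the per-string block both programs produce, as a flatMap body
def pvBlock (c a : String) (ds : List String) : List (String × String) :=
  (ds.filter (fun i => decide (a.toList ++ i.toList = c.toList))).map (fun i => (a, i))

-- the suffix B slices off is exactly dropping a's length from child's code points
theorem pvSuffix_toList (c a : String) :
    (PySem.Str.slice c (some (PySem.Str.len a)) none).toList = c.toList.drop a.toList.length := by
  rw [PySem.Str.toList_slice, PySem.Chars.slice_eq_listSlice, PySem.Str.len_eq]
  exact_mod_cast PySem.List.slice_from_natCast c.toList a.toList.length

-- A's dict maps each index to the dataset entry at that index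
theorem pvAd_getD (ds : List String) (x : Int)
    (hx : x ∈ PySem.List.pyRange 0 (PySem.List.len ds)) :
    PySem.Dict.getD ((PySem.List.pyRange 0 (PySem.List.len ds)).foldl
        (fun d i => d.insert i (PySem.List.pyGetD ds i "")) PySem.Dict.empty) x ""
      = PySem.List.pyGetD ds x "" := by
  have hn : (PySem.List.pyRange 0 (PySem.List.len ds)).Nodup := by
    have : PySem.List.len ds = ((ds.length : Nat) : Int) := rfl
    rw [this, PySem.List.pyRange_zero_natCast]
    exact (List.nodup_range).map (fun a b h => by exact_mod_cast h)
  have hitems := PySem.Dict.items_foldl_insert_fresh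
      (l := PySem.List.pyRange 0 (PySem.List.len ds)) (k := fun i => i)
      (v := fun i => PySem.List.pyGetD ds i "") (d := PySem.Dict.empty)
      (fun a _ => PySem.Dict.contains_empty a) (by simpa using hn)
  apply PySem.Dict.getD_of_mem_items
  · rw [hitems]
    simp only [PySem.Dict.empty, List.nil_append, List.mem_map]
    exact ⟨x, hx, rfl⟩
  · have := PySem.Dict.nodup_keys_foldl_insert
      (l := PySem.List.pyRange 0 (PySem.List.len ds))
      (f := fun d i => PySem.List.pyGetD ds i "") (d := PySem.Dict.empty)
      PySem.Dict.nodup_keys_empty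
    exact this

-- the inner loop of A appends, to the accumulator, one pair per matching dataset entry
theorem pvInner (c v : String) (ds : List String) (result : List (String × String)) :
    ds.foldl (fun result i =>
      if v.toList ++ i.toList = c.toList then result ++ [(v, i)] else result) result
      = result ++ pvBlock c v ds := by
  have h := PySem.List.foldl_append_if
    (p := fun i : String => decide (v.toList ++ i.toList = c.toList))
    (f := fun i : String => (v, i)) ds result
  simp only [decide_eq_true_eq] at h
  exact h

-- A's outer loop over any key list is a flatMap of pvBlock
theorem pvOuter (c : String) (ds : List String) (val : Int → String) (keys : List Int) :
    keys.foldl (fun result x =>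
      ds.foldl (fun result i =>
        if (val x).toList ++ i.toList = c.toList then result ++ [(val x, i)] else result)
        result) []
      = keys.flatMap (fun x => pvBlock c (val x) ds) := by
  simp only [pvInner]
  exact (PySem.List.foldl_append_eq_flatMap _ _ _).trans (List.nil_append _)

-- A computes the flatMap of pvBlock over the dataset
theorem pvA_eq_flatMap (c : String) (ds : List String) :
    find_parents c ds = ds.flatMap (fun a => pvBlock c a ds) := by
  have hstep : find_parents c ds
      = (((PySem.List.pyRange 0 (PySem.List.len ds)).foldl
          (fun d i => d.insert i (PySem.List.pyGetD ds i "")) PySem.Dict.empty).keys).flatMap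
        (fun x => pvBlock c (PySem.Dict.getD
          ((PySem.List.pyRange 0 (PySem.List.len ds)).foldl
            (fun d i => d.insert i (PySem.List.pyGetD ds i "")) PySem.Dict.empty) x "") ds) :=
    pvOuter c ds _ _
  rw [hstep]
  have hkeys : ((PySem.List.pyRange 0 (PySem.List.len ds)).foldl
        (fun d i => d.insert i (PySem.List.pyGetD ds i "")) PySem.Dict.empty).keys
      = PySem.List.pyRange 0 (PySem.List.len ds) := by
    have hnodup : (PySem.List.pyRange 0 (PySem.List.len ds)).Nodup := by
      have h0 : PySem.List.len ds = ((ds.length : Nat) : Int) := rfl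
      rw [h0, PySem.List.pyRange_zero_natCast]
      exact (List.nodup_range).map (fun a b h => by exact_mod_cast h)
    rw [PySem.Dict.keys_foldl_insert, PySem.Dict.keys_empty,
      PySem.Set.update_nil_left]
    exact PySem.Set.ofList_eq_self_of_nodup _ hnodup
  rw [hkeys, List.flatMap_def, List.flatMap_def]
  congr 1
  rw [List.map_congr_left (fun x hx => by rw [pvAd_getD ds x hx])]
  rw [show (fun x => pvBlock c (PySem.List.pyGetD ds x "") ds)
      = (fun a => pvBlock c a ds) ∘ (fun x => PySem.List.pyGetD ds x "") from rfl]
  rw [← List.map_map, PySem.List.map_pyGetD_pyRange_zero]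

-- B computes the flatMap of its replicate body over the dataset
theorem pvB_eq_flatMap (c : String) (ds : List String) :
    find_parents_alt c ds = ds.flatMap (fun a =>
      if PySem.Str.startswith c a then
        List.replicate (ds.count (PySem.Str.slice c (some (PySem.Str.len a)) none))
          (a, PySem.Str.slice c (some (PySem.Str.len a)) none)
      else []) := by
  show ds.foldl (fun result a =>
      if PySem.Str.startswith c a then
        result ++ List.replicate (PySem.Dict.getD
          (ds.foldl (fun d s => d.modify s 0 (fun x => x + 1)) (PySem.Dict.empty : PySem.Dict String Int))
          (PySem.Str.slice c (some (PySem.Str.len a)) none) 0).toNat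
          (a, PySem.Str.slice c (some (PySem.Str.len a)) none)
      else result) [] = _
  have hbody : (fun (result : List (String × String)) (a : String) =>
      if PySem.Str.startswith c a then
        result ++ List.replicate (PySem.Dict.getD
          (ds.foldl (fun d s => d.modify s 0 (fun x => x + 1)) (PySem.Dict.empty : PySem.Dict String Int))
          (PySem.Str.slice c (some (PySem.Str.len a)) none) 0).toNat
          (a, PySem.Str.slice c (some (PySem.Str.len a)) none)
      else result)
      = (fun result a => result ++ (if PySem.Str.startswith c a then
        List.replicate (ds.count (PySem.Str.slice c (some (PySem.Str.len a)) none))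
          (a, PySem.Str.slice c (some (PySem.Str.len a)) none)
      else [])) := by
    funext result a
    by_cases h : PySem.Str.startswith c a = true
    · rw [if_pos h, if_pos h, PySem.Dict.getD_foldl_modify_add_one, PySem.Dict.getD_empty]
      norm_num
    · rw [if_neg h, if_neg h, List.append_nil]
  rw [hbody, PySem.List.foldl_append_eq_flatMap, List.nil_append]

-- pointwise agreement of the two flatMap bodies
theorem pvBlock_eq (c a : String) (ds : List String) :
    pvBlock c a ds = (if PySem.Str.startswith c a then
        List.replicate (ds.count (PySem.Str.slice c (some (PySem.Str.len a)) none))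
          (a, PySem.Str.slice c (some (PySem.Str.len a)) none)
      else []) := by
  by_cases h : PySem.Str.startswith c a
  · simp only [h, if_true]
    set suf := PySem.Str.slice c (some (PySem.Str.len a)) none with hsuf
    have hpre : a.toList <+: c.toList := by
      rw [PySem.Str.startswith_eq] at h
      exact (PySem.Chars.startswith_iff c.toList a.toList).mp h
    obtain ⟨t, ht⟩ := hpre
    have hsufl : suf.toList = t := by
      rw [hsuf, pvSuffix_toList, ← ht, List.drop_left]
    have hcond : ∀ i : String, (a.toList ++ i.toList = c.toList) ↔ i = suf := by
      intro i
      constructor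
      · intro hi
        apply String.toList_inj.mp
        rw [hsufl]
        have := hi.trans ht.symm
        exact List.append_cancel_left this
      · intro hi
        rw [hi, hsufl, ht]
    unfold pvBlock
    rw [List.filter_congr (fun i _ => by
      show decide (a.toList ++ i.toList = c.toList) = decide (i = suf)
      simp [hcond i])]
    rw [List.filter_eq, List.map_replicate]
  · rw [if_neg h]
    unfold pvBlock
    rw [List.filter_eq_nil_iff.mpr, List.map_nil]
    intro i _ hi
    rw [PySem.Str.startswith_eq] at h
    refine h ((PySem.Chars.startswith_iff c.toList a.toList).mpr ?_)
    exact ⟨i.toList, by simpa using hi⟩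

-- ===== VERDICT (by name: the statement is the Claim_ definition above) =====
theorem find_parents_spec : Claim_equal_find_parents := by
  intro c ds _
  show find_parents c ds = find_parents_alt c ds
  rw [pvA_eq_flatMap, pvB_eq_flatMap]
  exact List.flatMap_congr (fun a _ => pvBlock_eq c a ds)
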